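-- pv_equiv track=rewrite | github.com/kelviy/AVLGraph | src/plotting.py | get_max_count
-- ===== SOURCE A (Python) =====
-- def get_max_count(listx, listy):
--     group = listx[0]
--     max_value = listy[0]
--     max_listx = []
--     max_listy = []
--
--     for i in range(len(listx)):
--         if group != listx[i]:
--             max_listx.append(group)
--             max_listy.append(max_value)
--
--             group = listx[i]
--             max_value = listy[i]
--         else:
--             if max_value < listy[i]:
--                 max_value = listy[i]
--
--     max_listx.append(group)
--     max_listy.append(max_value)
--
--     return max_listx, max_listy
-- ===== SOURCE B (Python) =====
-- def get_max_count(listx, listy):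
--     n = len(listx)
--     starts = [i for i in range(n) if i == 0 or listx[i] != listx[i - 1]]
--     ends = starts[1:] + [n]
--     max_listx = [listx[i] for i in starts]
--     max_listy = [max(listy[i:j]) for i, j in zip(starts, ends)]
--     return max_listx, max_listy
-- ===== Notes on version B (the rewrite author's own statement) =====
-- stated objective: alternative
-- what changed: Replaces A's streaming state machine (carrying current group and running max, flushing on change) by staged comprehensions: first compute the list of run-start boundary indices, then build the keys by indexing the starts and the maxima by max() over the slice between consecutive boundaries.
import Mathlib
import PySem

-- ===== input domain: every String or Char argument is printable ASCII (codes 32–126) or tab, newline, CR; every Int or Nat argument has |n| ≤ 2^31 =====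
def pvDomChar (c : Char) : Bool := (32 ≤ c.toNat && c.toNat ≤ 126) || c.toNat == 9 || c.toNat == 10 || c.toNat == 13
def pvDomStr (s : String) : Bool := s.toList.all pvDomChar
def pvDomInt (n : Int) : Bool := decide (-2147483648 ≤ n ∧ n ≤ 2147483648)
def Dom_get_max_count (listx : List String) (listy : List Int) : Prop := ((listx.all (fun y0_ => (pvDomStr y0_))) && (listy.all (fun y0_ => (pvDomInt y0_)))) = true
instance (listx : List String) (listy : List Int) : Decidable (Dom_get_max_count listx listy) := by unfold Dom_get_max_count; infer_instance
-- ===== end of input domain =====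

-- B replaces A's streaming state machine by staged passes: compute run-start boundary indices,
-- then map keys by indexing and run maxima by max() over the slice between consecutive boundaries.


-- ===== PORT A =====
-- one iteration of A's for-loop; state = (group, max_value, max_listx, max_listy).
-- Indexing uses getD; Pre_ guarantees every index accessed is in range (Python raises otherwise).
def stepA (listx : List String) (listy : List Int)
    (s : String × Int × List String × List Int) (i : Nat) :
    String × Int × List String × List Int :=
  if s.1 ≠ listx.getD i "" then
    (listx.getD i "", listy.getD i 0, s.2.2.1 ++ [s.1], s.2.2.2 ++ [s.2.1])
  else if s.2.1 < listy.getD i 0 then (s.1, listy.getD i 0, s.2.2.1, s.2.2.2)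
  else s

def get_max_count (listx : List String) (listy : List Int) : List String × List Int :=
  let s := (List.range listx.length).foldl (stepA listx listy)
      (listx.getD 0 "", listy.getD 0 0, [], [])
  (s.2.2.1 ++ [s.1], s.2.2.2 ++ [s.2.1])

-- ===== PORT B =====
-- Python max(l); Pre_ keeps every slice it is applied to nonempty (Python raises on an empty one).
def pyMaxD (l : List Int) : Int := (PySem.List.max? l (fun y => y)).getD 0

-- Source B's 'starts' comprehension: run-start boundary indices.
def bStarts (listx : List String) : List Nat :=
  (List.range listx.length).filter (fun i => i == 0 || listx.getD i "" != listx.getD (i - 1) "")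

def get_max_count_alt (listx : List String) (listy : List Int) : List String × List Int :=
  let starts := bStarts listx
  let ends := starts.drop 1 ++ [listx.length]
  (starts.map (fun i => listx.getD i ""),
   (starts.zip ends).map (fun p =>
     pyMaxD (PySem.List.slice listy (some (p.1 : Int)) (some (p.2 : Int)))))

-- ===== PRECONDITION & SPEC =====
-- A raises IndexError on empty listx (listx[0]) and when listy is shorter than listx (listy[i]).
def Pre_get_max_count (listx : List String) (listy : List Int) : Prop :=
  listx ≠ [] ∧ listx.length ≤ listy.length
instance (listx : List String) (listy : List Int) : Decidable (Pre_get_max_count listx listy) := by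
  unfold Pre_get_max_count; infer_instance

def pvWitness_get_max_count : List String × List Int := (["a", "a", "b"], [1, 3, 2])

def Spec_get_max_count (listx : List String) (listy : List Int) (out : List String × List Int) : Prop := out = get_max_count_alt listx listy
instance (listx : List String) (listy : List Int) (out : List String × List Int) : Decidable (Spec_get_max_count listx listy out) := by unfold Spec_get_max_count; infer_instance

-- ===== CLAIM (what is proved, stated in full; the proofs are below) =====
def Claim_equal_get_max_count : Prop := ∀ (listx : List String) (listy : List Int), Dom_get_max_count listx listy → Pre_get_max_count listx listy → Spec_get_max_count listx listy (get_max_count listx listy)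

-- ===== LEMMAS AND PROOFS =====

-- common specification: the grouped output from position i onward, given the open run (g, m).
def specRun (listx : List String) (listy : List Int) (g : String) (m : Int) (i : Nat) :
    List String × List Int :=
  if h : i < listx.length then
    if listx.getD i "" = g then
      specRun listx listy g (if m < listy.getD i 0 then listy.getD i 0 else m) (i + 1)
    else
      let r := specRun listx listy (listx.getD i "") (listy.getD i 0) (i + 1)
      (g :: r.1, m :: r.2)
  else ([g], [m])
termination_by listx.length - i
decreasing_by all_goals omega

def specStart (listx : List String) (listy : List Int) (i : Nat) : List String × List Int :=
  if i < listx.length then specRun listx listy (listx.getD i "") (listy.getD i 0) (i + 1)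
  else ([], [])

-- scan of one equal-run: first index ≥ i that leaves the run, and the running max so far.
def scanRun (listx : List String) (listy : List Int) (g : String) : Nat → Int → Nat → Nat × Int
  | 0, m, i => (i, m)
  | fuel + 1, m, i =>
    if i < listx.length ∧ listx.getD i "" = g then
      scanRun listx listy g fuel (if m < listy.getD i 0 then listy.getD i 0 else m) (i + 1)
    else (i, m)

theorem scanRun_ge (listx : List String) (listy : List Int) (g : String) :
    ∀ (fuel : Nat) (m : Int) (i : Nat), i ≤ (scanRun listx listy g fuel m i).1 := by
  intro fuel
  induction fuel with
  | zero => intro m i; simp [scanRun]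
  | succ fuel ih =>
      intro m i
      simp only [scanRun]
      split
      · have := ih (if m < listy.getD i 0 then listy.getD i 0 else m) (i + 1)
        omega
      · simp

theorem specRun_scan (listx : List String) (listy : List Int) (g : String) :
    ∀ (fuel : Nat) (m : Int) (i : Nat), listx.length - i ≤ fuel →
    specRun listx listy g m i =
      (g :: (specStart listx listy (scanRun listx listy g fuel m i).1).1,
       (scanRun listx listy g fuel m i).2 :: (specStart listx listy (scanRun listx listy g fuel m i).1).2) := by
  intro fuel
  induction fuel with
  | zero =>
      intro m i hf
      have h : ¬ i < listx.length := by omega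
      rw [specRun, dif_neg h]
      simp [scanRun, specStart, if_neg h]
  | succ fuel ih =>
      intro m i hf
      by_cases hc : i < listx.length ∧ listx.getD i "" = g
      · rw [specRun, dif_pos hc.1, if_pos hc.2]
        simp only [scanRun, if_pos hc]
        exact ih _ (i + 1) (by omega)
      · simp only [scanRun, if_neg hc]
        rw [specRun, specStart]
        by_cases hl : i < listx.length
        · have hne : ¬ listx.getD i "" = g := fun he => hc ⟨hl, he⟩
          rw [dif_pos hl, if_neg hne, if_pos hl]
        · rw [dif_neg hl, if_neg hl]

theorem foldA_spec (listx : List String) (listy : List Int) :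
    ∀ (k : Nat) (g : String) (m : Int) (mx : List String) (my : List Int), k ≤ listx.length →
      (let s := (List.range' k (listx.length - k)).foldl (stepA listx listy) (g, m, mx, my)
       (s.2.2.1 ++ [s.1], s.2.2.2 ++ [s.2.1])) =
      (mx ++ (specRun listx listy g m k).1, my ++ (specRun listx listy g m k).2) := by
  intro k
  induction hk : listx.length - k generalizing k with
  | zero =>
      intro g m mx my hkle
      have : listx.length = k := by omega
      rw [specRun, dif_neg (by omega)]
      simp
  | succ n ih =>
      intro g m mx my hkle
      have hkl : k < listx.length := by omega
      rw [List.range'_succ, List.foldl_cons]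
      rw [specRun, dif_pos hkl]
      by_cases he : listx.getD k "" = g
      · rw [if_pos he]
        have hstep : stepA listx listy (g, m, mx, my) k =
            (g, if m < listy.getD k 0 then listy.getD k 0 else m, mx, my) := by
          unfold stepA
          simp only [he]
          split_ifs with h1 h2 <;> simp_all
        rw [hstep]
        have := ih (k + 1) (by omega) g (if m < listy.getD k 0 then listy.getD k 0 else m) mx my (by omega)
        simpa using this
      · rw [if_neg he]
        have hstep : stepA listx listy (g, m, mx, my) k =
            (listx.getD k "", listy.getD k 0, mx ++ [g], my ++ [m]) := by
          unfold stepA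
          rw [if_pos (by simpa using fun hc => he hc.symm)]
        rw [hstep]
        have := ih (k + 1) (by omega) (listx.getD k "") (listy.getD k 0) (mx ++ [g]) (my ++ [m]) (by omega)
        rw [this]
        simp

-- slice ly[i:j] peels its first element when i < j and i is in range.
theorem slice_cons_getD (ly : List Int) (i j : Nat) (hij : i < j) (hi : i < ly.length) :
    PySem.List.slice ly (some (i : Int)) (some (j : Int)) =
      ly.getD i 0 :: PySem.List.slice ly (some ((i + 1 : Nat) : Int)) (some (j : Int)) := by
  rw [PySem.List.slice_natCast, PySem.List.slice_natCast]
  rw [List.drop_eq_getElem_cons hi]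
  rw [show j - i = (j - (i + 1)) + 1 by omega]
  rw [List.take_succ_cons]
  rw [List.getD_eq_getElem ly 0 hi]

-- full characterisation of scanRun: bounds, run contents, exit condition, and its max as a slice fold.
theorem scanRun_spec (listx : List String) (listy : List Int) (g : String)
    (hle : listx.length ≤ listy.length) :
    ∀ (fuel : Nat) (m : Int) (i : Nat), listx.length - i ≤ fuel → i ≤ listx.length →
      (scanRun listx listy g fuel m i).1 ≤ listx.length ∧
      (∀ t, i ≤ t → t < (scanRun listx listy g fuel m i).1 → listx.getD t "" = g) ∧
      ((scanRun listx listy g fuel m i).1 < listx.length →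
        listx.getD (scanRun listx listy g fuel m i).1 "" ≠ g) ∧
      (scanRun listx listy g fuel m i).2 =
        (PySem.List.slice listy (some (i : Int)) (some ((scanRun listx listy g fuel m i).1 : Int))).foldl
          (fun m y => if m < y then y else m) m := by
  intro fuel
  induction fuel with
  | zero =>
      intro m i hf hi
      have hni : i = listx.length := by omega
      simp only [scanRun]
      refine ⟨by omega, by omega, by omega, ?_⟩
      rw [PySem.List.slice_natCast]
      simp
  | succ fuel ih =>
      intro m i hf hi
      by_cases hc : i < listx.length ∧ listx.getD i "" = g
      · simp only [scanRun, if_pos hc]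
        obtain ⟨h1, h2, h3, h4⟩ :=
          ih (if m < listy.getD i 0 then listy.getD i 0 else m) (i + 1) (by omega) (by omega)
        have hge := scanRun_ge listx listy g fuel
          (if m < listy.getD i 0 then listy.getD i 0 else m) (i + 1)
        refine ⟨h1, ?_, h3, ?_⟩
        · intro t ht1 ht2
          rcases Nat.eq_or_lt_of_le ht1 with h | h
          · exact h ▸ hc.2
          · exact h2 t h ht2
        · rw [slice_cons_getD listy i _ (by omega) (by omega), List.foldl_cons, h4]
      · simp only [scanRun, if_neg hc]
        refine ⟨hi, by omega, ?_, ?_⟩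
        · intro hlt
          exact fun he => hc ⟨hlt, he⟩
        · rw [PySem.List.slice_natCast]
          simp

-- Python's max over a nonempty slice ly[s:j] is the running max of A's comparison loop.
theorem pyMaxD_slice (ly : List Int) (s j : Nat) (hsj : s < j) (hs : s < ly.length) :
    pyMaxD (PySem.List.slice ly (some (s : Int)) (some (j : Int))) =
      (PySem.List.slice ly (some ((s + 1 : Nat) : Int)) (some (j : Int))).foldl
        (fun m y => if m < y then y else m) (ly.getD s 0) := by
  rw [slice_cons_getD ly s j hsj hs]
  unfold pyMaxD
  rw [PySem.List.max?_id_cons]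
  have hmax : (fun (m y : Int) => if m < y then y else m) = max := by
    funext a b
    rw [max_def]
    split_ifs <;> omega
  rw [hmax]
  rfl

-- the boundary predicate of Source B for indices ≥ 1
def runF (listx : List String) : Nat → Bool := fun i => listx.getD i "" != listx.getD (i - 1) ""

-- B's staged computation, started at a run boundary s
def outFrom (listx : List String) (listy : List Int) (s : Nat) : List String × List Int :=
  let ss := s :: (List.range' (s + 1) (listx.length - (s + 1))).filter (runF listx)
  (ss.map (fun i => listx.getD i ""),
   (ss.zip (ss.drop 1 ++ [listx.length])).map (fun p =>
     pyMaxD (PySem.List.slice listy (some (p.1 : Int)) (some (p.2 : Int)))))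

theorem outFrom_eq (listx : List String) (listy : List Int) (hle : listx.length ≤ listy.length) :
    ∀ (fuel s : Nat), listx.length - s ≤ fuel → s < listx.length →
      outFrom listx listy s = specRun listx listy (listx.getD s "") (listy.getD s 0) (s + 1) := by
  intro fuel
  induction fuel with
  | zero => intro s hf hs; omega
  | succ fuel ih =>
      intro s hf hs
      set g := listx.getD s "" with hg
      set r := scanRun listx listy g (listx.length - (s + 1)) (listy.getD s 0) (s + 1) with hr
      obtain ⟨hj, hrun, hexit, hM⟩ :=
        scanRun_spec listx listy g hle (listx.length - (s + 1)) (listy.getD s 0) (s + 1)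
          (by omega) (by omega)
      rw [← hr] at hj hrun hexit hM
      have hsj : s + 1 ≤ r.1 := scanRun_ge listx listy g _ _ _
      have hspec := specRun_scan listx listy g (listx.length - (s + 1)) (listy.getD s 0) (s + 1)
        (by omega)
      rw [← hr] at hspec
      -- value of the first run's max
      have hMax : pyMaxD (PySem.List.slice listy (some (s : Int)) (some (r.1 : Int))) = r.2 := by
        rw [pyMaxD_slice listy s r.1 (by omega) (by omega), hM]
      -- consecutive equal elements inside the run make runF false
      have hFfalse : ∀ t, s + 1 ≤ t → t < r.1 → runF listx t = false := by
        intro t ht1 ht2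
        have he1 : listx.getD t "" = g := hrun t ht1 ht2
        have he2 : listx.getD (t - 1) "" = g := by
          rcases Nat.eq_or_lt_of_le ht1 with h | h
          · rw [show t - 1 = s by omega]
          · exact hrun (t - 1) (by omega) (by omega)
        simp only [runF, he1, he2, bne_self_eq_false]
      have hsplit : List.range' (s + 1) (listx.length - (s + 1)) =
          List.range' (s + 1) (r.1 - (s + 1)) ++ List.range' r.1 (listx.length - r.1) := by
        rw [show List.range' r.1 (listx.length - r.1) =
            List.range' ((s + 1) + (r.1 - (s + 1))) (listx.length - r.1) by rw [show (s + 1) + (r.1 - (s + 1)) = r.1 by omega]]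
        rw [List.range'_append_1]
        rw [show r.1 - (s + 1) + (listx.length - r.1) = listx.length - (s + 1) by omega]
      have hfilter1 : (List.range' (s + 1) (r.1 - (s + 1))).filter (runF listx) = [] := by
        rw [List.filter_eq_nil_iff]
        intro t htmem
        rw [List.mem_range'] at htmem
        obtain ⟨k, hk1, hk2⟩ := htmem
        simp [hFfalse t (by omega) (by omega)]
      by_cases hjn : r.1 < listx.length
      · -- another run starts at r.1
        have hFj : runF listx r.1 = true := by
          have he1 : listx.getD r.1 "" ≠ g := hexit hjn
          have he2 : listx.getD (r.1 - 1) "" = g := by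
            rcases Nat.eq_or_lt_of_le hsj with h | h
            · rw [show r.1 - 1 = s by omega]
            · exact hrun (r.1 - 1) (by omega) (by omega)
          have hne : listx.getD r.1 "" ≠ listx.getD (r.1 - 1) "" := by
            rw [he2]; exact he1
          simpa only [runF, bne_iff_ne, ne_eq, decide_not] using hne
        have hfilter : (List.range' (s + 1) (listx.length - (s + 1))).filter (runF listx) =
            r.1 :: (List.range' (r.1 + 1) (listx.length - (r.1 + 1))).filter (runF listx) := by
          rw [hsplit, List.filter_append, hfilter1, List.nil_append]
          rw [show listx.length - r.1 = (listx.length - (r.1 + 1)) + 1 by omega]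
          rw [List.range'_succ, List.filter_cons, if_pos hFj]
        have hIH := ih r.1 (by omega) hjn
        rw [hspec]
        have hstart : specStart listx listy r.1 =
            specRun listx listy (listx.getD r.1 "") (listy.getD r.1 0) (r.1 + 1) := by
          rw [specStart, if_pos hjn]
        rw [hstart] at hspec ⊢
        rw [← hIH]
        unfold outFrom
        rw [hfilter]
        simp only [List.map_cons, List.zip_cons_cons, List.drop_succ_cons, List.drop_zero,
          List.cons_append, List.map]
        rw [hMax]
      · -- the first run reaches the end of the list
        have hjn' : r.1 = listx.length := by omega
        have hfilter : (List.range' (s + 1) (listx.length - (s + 1))).filter (runF listx) = [] := by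
          rw [hsplit, List.filter_append, hfilter1, List.nil_append]
          rw [show listx.length - r.1 = 0 by omega]
          simp
        rw [hspec]
        have hstart : specStart listx listy r.1 = ([], []) := by
          rw [specStart, if_neg (by omega)]
        rw [hstart]
        unfold outFrom
        rw [hfilter]
        simp only [List.map_cons, List.map_nil, List.drop_succ_cons, List.drop_zero,
          List.nil_append, List.zip_cons_cons, List.zip_nil_right]
        rw [hjn'] at hMax
        rw [hMax]

-- Source B's starts list, unfolded at a nonempty listx
theorem bStarts_eq (listx : List String) (h : 0 < listx.length) :
    bStarts listx = 0 :: (List.range' 1 (listx.length - 1)).filter (runF listx) := by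
  unfold bStarts
  have hrange : List.range' 0 listx.length = 0 :: List.range' 1 (listx.length - 1) := by
    obtain ⟨m, hm⟩ : ∃ m, listx.length = m + 1 := ⟨listx.length - 1, by omega⟩
    rw [hm]
    simp [List.range'_succ]
  rw [List.range_eq_range', hrange, List.filter_cons]
  simp only [show ((0 == 0 : Bool) || (listx.getD 0 "" != listx.getD (0 - 1) "")) = true by simp,
    if_pos]
  congr 1
  apply List.filter_congr
  intro t htmem
  rw [List.mem_range'] at htmem
  obtain ⟨k, hk1, hk2⟩ := htmem
  have ht0 : (t == 0) = false := by simp; omega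
  simp [runF, ht0]

theorem alt_eq_outFrom (listx : List String) (listy : List Int) (h : 0 < listx.length) :
    get_max_count_alt listx listy = outFrom listx listy 0 := by
  unfold get_max_count_alt outFrom
  rw [bStarts_eq listx h]

-- ===== VERDICT (by name: the statement is the Claim_ definition above) =====
theorem get_max_count_spec : Claim_equal_get_max_count := by
  intro listx listy _ hpre
  unfold Spec_get_max_count get_max_count
  obtain ⟨hne, hle⟩ := hpre
  have hn : 0 < listx.length := List.length_pos_iff.mpr hne
  rw [alt_eq_outFrom listx listy hn]
  rw [outFrom_eq listx listy hle listx.length 0 (by omega) hn]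
  have h0 : List.range listx.length = 0 :: List.range' 1 (listx.length - 1) := by
    rw [List.range_eq_range', show listx.length = (listx.length - 1) + 1 by omega]
    rw [List.range'_succ]
    simp
  rw [h0, List.foldl_cons]
  have hstep0 : stepA listx listy (listx.getD 0 "", listy.getD 0 0, [], []) 0 =
      (listx.getD 0 "", listy.getD 0 0, [], []) := by
    unfold stepA; simp
  rw [hstep0]
  have := foldA_spec listx listy 1 (listx.getD 0 "") (listy.getD 0 0) [] [] (by omega)
  simpa using this
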